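-- pv_equiv track=rewrite | github.com/cualestunombre/Algorithm | 구현/코드트리(삼성전자) 팩맨.py | movePackMan
-- ===== SOURCE A (Python) =====
-- moveDir = [(-1,0),(0,-1),(1,0),(0,1)]
--
-- def movePackMan(l,pack,monsters):
--     answer = 0
--     px,py = pack
--     visited = {}
--     for index in l:
--         dx,dy = moveDir[index]
--         if px+dx>0 and px+dx<=4 and py+dy>0 and py+dy<=4:
--             px +=dx
--             py +=dy
--             answer = len(monsters[(px,py)]) +answer  if (px,py) in monsters and (px,py) not in visited else answer
--             visited[(px,py)] = True
--         else:
--             return 0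
--     return answer
-- ===== SOURCE B (Python) =====
-- # B: separates trajectory construction (recursive walk, early None on a wall hit)
-- # from the aggregation (a single set-based dedup sum over the collected path).
-- moveDir = [(-1,0),(0,-1),(1,0),(0,1)]
--
-- def _walk(l, px, py):
--     if not l:
--         return []
--     dx, dy = moveDir[l[0]]
--     nx, ny = px + dx, py + dy
--     if 0 < nx <= 4 and 0 < ny <= 4:
--         rest = _walk(l[1:], nx, ny)
--         return None if rest is None else [(nx, ny)] + rest
--     return None
--
-- def movePackMan(l, pack, monsters):
--     path = _walk(l, pack[0], pack[1])
--     if path is None: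
--         return 0
--     return sum(len(monsters[p]) for p in set(path) if p in monsters)
-- ===== Notes on version B (the rewrite author's own statement) =====
-- stated objective: alternative
-- what changed: B decomposes A's single stateful loop (running visited-dict and accumulator) into a recursive walk that returns the list of reached cells (or None on a wall hit) followed by one set-based dedup sum over that path.
import Mathlib
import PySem

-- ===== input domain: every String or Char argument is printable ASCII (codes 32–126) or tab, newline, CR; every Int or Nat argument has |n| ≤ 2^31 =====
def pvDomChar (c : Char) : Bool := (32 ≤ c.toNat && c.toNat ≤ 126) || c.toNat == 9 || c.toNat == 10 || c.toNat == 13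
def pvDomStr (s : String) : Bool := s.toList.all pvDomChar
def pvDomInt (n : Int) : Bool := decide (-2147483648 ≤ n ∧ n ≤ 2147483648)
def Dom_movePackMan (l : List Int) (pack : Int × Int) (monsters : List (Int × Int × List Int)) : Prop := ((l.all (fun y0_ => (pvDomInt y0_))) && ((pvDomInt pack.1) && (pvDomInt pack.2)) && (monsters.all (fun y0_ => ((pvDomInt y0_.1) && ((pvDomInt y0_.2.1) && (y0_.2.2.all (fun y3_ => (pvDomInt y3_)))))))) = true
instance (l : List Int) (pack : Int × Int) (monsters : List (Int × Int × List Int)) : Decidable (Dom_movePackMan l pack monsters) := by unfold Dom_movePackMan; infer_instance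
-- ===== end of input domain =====

-- ===== PORT A =====
-- B changes the decomposition only: a trajectory walk then a set-based dedup sum,
-- instead of A's single loop with a visited dict and a running accumulator.
-- moveDir module constant
def pvMoveDir : List (Int × Int) := [(-1,0),(0,-1),(1,0),(0,1)]

-- dict lookup 'monsters[(x,y)]' / '(x,y) in monsters' (first match, per the association-list convention)
def pvMonGet (monsters : List (Int × Int × List Int)) (x y : Int) : Option (List Int) :=
  match monsters with
  | [] => none
  | (a, b, ms) :: rest => if a = x ∧ b = y then some ms else pvMonGet rest x y

-- A's for-loop over l with state (px, py, visited, answer); pyGet? none = IndexError (excluded by Pre_)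
def movePackManLoop (monsters : List (Int × Int × List Int)) :
    List Int → Int → Int → PySem.Dict (Int × Int) Bool → Int → Int
  | [], _, _, _, answer => answer
  | index :: rest, px, py, visited, answer =>
    match PySem.List.pyGet? pvMoveDir index with
    | none => 0
    | some (dx, dy) =>
      if px + dx > 0 ∧ px + dx ≤ 4 ∧ py + dy > 0 ∧ py + dy ≤ 4 then
        let px' := px + dx
        let py' := py + dy
        let answer' :=
          if (pvMonGet monsters px' py').isSome ∧ ¬ visited.contains (px', py') then
            (((pvMonGet monsters px' py').getD []).length : Int) + answer
          else answer
        movePackManLoop monsters rest px' py' (visited.insert (px', py') true) answer'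
      else 0

def movePackMan (l : List Int) (pack : Int × Int) (monsters : List (Int × Int × List Int)) : Int :=
  movePackManLoop monsters l pack.1 pack.2 PySem.Dict.empty 0

-- ===== PORT B =====
-- B's _walk: list of reached cells, none on a wall hit (and on IndexError, excluded by Pre_)
def movePackManWalk : List Int → Int → Int → Option (List (Int × Int))
  | [], _, _ => some []
  | index :: rest, px, py =>
    match PySem.List.pyGet? pvMoveDir index with
    | none => none
    | some (dx, dy) =>
      let nx := px + dx
      let ny := py + dy
      if 0 < nx ∧ nx ≤ 4 ∧ 0 < ny ∧ ny ≤ 4 then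
        (movePackManWalk rest nx ny).map (fun tail => (nx, ny) :: tail)
      else none

-- sum(len(monsters[p]) for p in set(path) if p in monsters)
def movePackMan_alt (l : List Int) (pack : Int × Int) (monsters : List (Int × Int × List Int)) : Int :=
  match movePackManWalk l pack.1 pack.2 with
  | none => 0
  | some path =>
    (PySem.Set.ofList path).foldl
      (fun s p =>
        if (pvMonGet monsters p.1 p.2).isSome then
          s + (((pvMonGet monsters p.1 p.2).getD []).length : Int)
        else s) 0

-- ===== PRECONDITION & SPEC =====
-- Both A and B raise IndexError exactly when a move index outside [-4,4) is actually REACHED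
-- (no earlier wall bail stops the loop first); pvReachedOk checks only index validity along the
-- trajectory (simple boundary arithmetic on the input) and computes no output of either program.
def pvReachedOk : List Int → Int → Int → Bool
  | [], _, _ => true
  | index :: rest, px, py =>
    match PySem.List.pyGet? pvMoveDir index with
    | none => false
    | some (dx, dy) =>
      if 0 < px + dx ∧ px + dx ≤ 4 ∧ 0 < py + dy ∧ py + dy ≤ 4 then
        pvReachedOk rest (px + dx) (py + dy)
      else true

-- Pre_ excludes exactly the inputs on which A (and B) raise IndexError: an out-of-range move
-- index that the loop actually reaches; inputs where a wall bail precedes the bad index are kept.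
def Pre_movePackMan (l : List Int) (pack : Int × Int) (monsters : List (Int × Int × List Int)) : Prop :=
  pvReachedOk l pack.1 pack.2 = true
instance (l : List Int) (pack : Int × Int) (monsters : List (Int × Int × List Int)) : Decidable (Pre_movePackMan l pack monsters) := by unfold Pre_movePackMan; infer_instance

def pvWitness_movePackMan : List Int × (Int × Int) × (List (Int × Int × List Int)) :=
  ([2, 3], (1, 1), [(2, 1, [5, 7])])

def Spec_movePackMan (l : List Int) (pack : Int × Int) (monsters : List (Int × Int × List Int)) (out : Int) : Prop := out = movePackMan_alt l pack monsters
instance (l : List Int) (pack : Int × Int) (monsters : List (Int × Int × List Int)) (out : Int) : Decidable (Spec_movePackMan l pack monsters out) := by unfold Spec_movePackMan; infer_instance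

-- ===== CLAIM (what is proved, stated in full; the proofs are below) =====
def Claim_equal_movePackMan : Prop := ∀ (l : List Int) (pack : Int × Int) (monsters : List (Int × Int × List Int)), Dom_movePackMan l pack monsters → Pre_movePackMan l pack monsters → Spec_movePackMan l pack monsters (movePackMan l pack monsters)

-- ===== LEMMAS AND PROOFS =====
-- contribution of a cell (0 when absent from monsters)
def pvC (monsters : List (Int × Int × List Int)) (p : Int × Int) : Int :=
  (((pvMonGet monsters p.1 p.2).getD []).length : Int)

-- dedup sum along a path, parametrised by the "already visited" predicate
def pvSumD (monsters : List (Int × Int × List Int)) : ((Int × Int) → Bool) → List (Int × Int) → Int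
  | _, [] => 0
  | f, q :: ps =>
    (if f q then 0 else pvC monsters q) + pvSumD monsters (fun r => r == q || f r) ps

theorem pvMonGet_none_len (monsters : List (Int × Int × List Int)) (p : Int × Int)
    (h : (pvMonGet monsters p.1 p.2).isSome = false) : pvC monsters p = 0 := by
  unfold pvC
  cases hg : pvMonGet monsters p.1 p.2 with
  | none => simp
  | some ms => rw [hg] at h; simp at h

theorem pvSum_erase (q : Int × Int) (g g' : (Int × Int) → Int)
    (hq : g' q = 0) (hne : ∀ r, r ≠ q → g' r = g r) :
    ∀ s : List (Int × Int), (s.map g').sum = ((s.filter (fun r => !(r == q))).map g).sum := by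
  intro s
  induction s with
  | nil => simp
  | cons x xs ih =>
    by_cases hx : x = q
    · subst hx; simp [hq, ih]
    · simp [hx, hne x hx, ih]

theorem pvSumD_eq_set (monsters : List (Int × Int × List Int)) :
    ∀ (path : List (Int × Int)) (f : (Int × Int) → Bool),
      pvSumD monsters f path =
        (((PySem.Set.ofList path).map
          (fun q => if f q then 0 else pvC monsters q)).sum : Int) := by
  intro path
  induction path with
  | nil => intro f; simp [pvSumD, PySem.Set.ofList_nil]
  | cons q ps ih =>
    intro f
    rw [PySem.Set.ofList_cons]
    have hdis : PySem.Set.discard (PySem.Set.ofList ps) q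
        = (PySem.Set.ofList ps).filter (fun r => !(r == q)) := by
      simp [PySem.Set.discard]
    simp only [pvSumD, List.map_cons, List.sum_cons, ih, hdis]
    congr 1
    have := pvSum_erase q (g := fun r => if f r then 0 else pvC monsters r)
      (g' := fun r => if (r == q || f r) then 0 else pvC monsters r)
      (by simp) (by intro r hr; simp [hr]) (PySem.Set.ofList ps)
    simpa using this

theorem pvLoop_eq_walk (monsters : List (Int × Int × List Int)) :
    ∀ (l : List Int) (px py : Int) (v : PySem.Dict (Int × Int) Bool) (answer : Int),
      pvReachedOk l px py = true →
      movePackManLoop monsters l px py v answer =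
        match movePackManWalk l px py with
        | none => 0
        | some path => answer + pvSumD monsters (fun q => v.contains q) path := by
  intro l
  induction l with
  | nil => intro px py v answer _; simp [movePackManLoop, movePackManWalk, pvSumD]
  | cons index rest ih =>
    intro px py v answer hok
    simp only [movePackManLoop, movePackManWalk]
    cases hg : PySem.List.pyGet? pvMoveDir index with
    | none =>
      exfalso
      unfold pvReachedOk at hok
      rw [hg] at hok
      simp at hok
    | some d =>
      obtain ⟨dx, dy⟩ := d
      simp only []
      by_cases hb : px + dx > 0 ∧ px + dx ≤ 4 ∧ py + dy > 0 ∧ py + dy ≤ 4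
      · have hb' : 0 < px + dx ∧ px + dx ≤ 4 ∧ 0 < py + dy ∧ py + dy ≤ 4 := hb
        rw [if_pos hb, if_pos hb']
        have hok' : pvReachedOk rest (px + dx) (py + dy) = true := by
          unfold pvReachedOk at hok
          rw [hg] at hok
          simpa [hb'] using hok
        rw [ih (px + dx) (py + dy) _ _ hok']
        cases hw : movePackManWalk rest (px + dx) (py + dy) with
        | none => simp
        | some path =>
          simp only [Option.map_some]
          have hcont : (fun q => (v.insert (px + dx, py + dy) true).contains q)
              = (fun r => r == (px + dx, py + dy) || v.contains r) := by
            funext q; simp [PySem.Dict.contains_insert]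
          rw [hcont]
          simp only [pvSumD]
          have harr :
              (if (pvMonGet monsters (px + dx) (py + dy)).isSome = true
                  ∧ ¬ v.contains (px + dx, py + dy) = true then
                (((pvMonGet monsters (px + dx) (py + dy)).getD []).length : Int) + answer
              else answer)
              = answer + (if v.contains (px + dx, py + dy) = true then 0
                  else pvC monsters (px + dx, py + dy)) := by
            by_cases hv : v.contains (px + dx, py + dy) = true
            · simp [hv]
            · by_cases hm : (pvMonGet monsters (px + dx) (py + dy)).isSome = true
              · rw [if_pos ⟨hm, hv⟩, if_neg hv]
                unfold pvC
                ring
              · have hc : ¬ ((pvMonGet monsters (px + dx) (py + dy)).isSome = true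
                    ∧ ¬ v.contains (px + dx, py + dy) = true) := fun h => hm h.1
                rw [if_neg hc, if_neg hv,
                  pvMonGet_none_len monsters (px + dx, py + dy) (by simpa using hm)]
                ring
          rw [harr]
          ring
      · have hb' : ¬ (0 < px + dx ∧ px + dx ≤ 4 ∧ 0 < py + dy ∧ py + dy ≤ 4) := hb
        rw [if_neg hb, if_neg hb']

theorem pvAlt_sum (monsters : List (Int × Int × List Int)) (path : List (Int × Int)) :
    (PySem.Set.ofList path).foldl
      (fun s p =>
        if (pvMonGet monsters p.1 p.2).isSome then
          s + (((pvMonGet monsters p.1 p.2).getD []).length : Int)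
        else s) 0
    = (((PySem.Set.ofList path).map (fun q => pvC monsters q)).sum : Int) := by
  have hcg := PySem.List.foldl_congr_mem
    (l := PySem.Set.ofList path) (init := (0 : Int))
    (f := fun s p =>
      if (pvMonGet monsters p.1 p.2).isSome then
        s + (((pvMonGet monsters p.1 p.2).getD []).length : Int)
      else s)
    (g := fun s p => s + pvC monsters p)
    (by
      intro acc x _
      by_cases hm : (pvMonGet monsters x.1 x.2).isSome
      · simp [hm, pvC]
      · simp [hm, pvMonGet_none_len monsters x (by simpa using hm)])
  rw [hcg, PySem.List.foldl_add]
  ring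

-- ===== VERDICT (by name: the statement is the Claim_ definition above) =====
theorem movePackMan_spec : Claim_equal_movePackMan := by
  intro l pack monsters _ hpre
  unfold Spec_movePackMan movePackMan movePackMan_alt
  rw [pvLoop_eq_walk monsters l pack.1 pack.2 _ _ hpre]
  cases hw : movePackManWalk l pack.1 pack.2 with
  | none => rfl
  | some path =>
    simp only []
    rw [pvAlt_sum, pvSumD_eq_set]
    simp [PySem.Dict.contains_empty]
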